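/- GENERATED by farm/mkstatement.py from design/units.tsv (unit `start_decoder.R12d`) and the assertions of Vorbis/Spec/StartDecoderR12.lean — do not edit.
   THE STATEMENT of the proof unit `start_decoder.R12d`: segment R12d of `start_decoder` (26 instructions; entries 0x1164c7;
   exits 0x116545,0x113b22; ranges 0x1164c7-0x116541)
   takes each of its entry assertions to one of its exit assertions (`Vorbis.Spec.StartDecoder.SegR12d`), given the contracts of its callees.
   What the names mean: Vorbis/Spec/Basic.lean (the shared hypotheses), Vorbis/Spec/StartDecoderR12.lean (the assertions). The theorem to prove:
   `theorem start_decoder_R12d_ok : Vorbis.Spec.start_decoder_R12d.Statement`. -/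
import Vorbis.Spec.Leaves
import Vorbis.Spec.StartDecoderR12
namespace Vorbis.Spec.start_decoder_R12d
open X86 X86.User Asan

/-- The statement of unit `start_decoder.R12d`. -/
def Statement : Prop :=
  ∀ (Lay : Layout) (_hLay : Lay.hi = 0x1000000) (μ : Microarch) (_hμ : UserX.MicroOK μ) (u₀ : State)
    (_hcode : HasCodeNat Lay u₀ Vorbis.L.start_decoder.entry Vorbis.Code.code_start_decoder.nat Vorbis.L.start_decoder.size)
    (_h_asan_store1_noabort : Asan.SmallCheck Lay μ Vorbis.WayInv (Vorbis.CodeOK u₀) [.rax, .rdx] 1 Vorbis.L.__asan_store1_noabort.entry)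
    (_h_asan_load1_noabort : Asan.SmallCheck Lay μ Vorbis.WayInv (Vorbis.CodeOK u₀) [.rax, .rdx] 1 Vorbis.L.__asan_load1_noabort.entry)
    (_h_asan_load4_noabort : Asan.SmallCheck Lay μ Vorbis.WayInv (Vorbis.CodeOK u₀) [.rax, .rcx, .rdx] 4 Vorbis.L.__asan_load4_noabort.entry)
    (_h_error : ∀ (others : List Obj) (frames : List (Nat × FrameLayout)), Calls Lay μ Vorbis.WayInv (Vorbis.conv u₀) Vorbis.L.error.entry (Vorbis.Spec.error.spec others frames)),
    Vorbis.Spec.StartDecoder.SegR12d Lay μ u₀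

end Vorbis.Spec.start_decoder_R12d
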